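-- pv_equiv track=rewrite | github.com/btfranklin/compendiumscribe | src/compendiumscribe/research_domain.py | _strip_leading_markdown_header
-- ===== SOURCE A (Python) =====
-- def _strip_leading_markdown_header(text: str) -> str:
--     lines = text.splitlines()
--     trimmed: list[str] = []
--     skipping = True
--
--     for line in lines:
--         stripped = line.strip()
--         if skipping and stripped.startswith("# "):
--             continue
--         if skipping and not stripped:
--             continue
--
--         skipping = False
--         trimmed.append(line)
--
--     return "\n".join(trimmed).lstrip()
-- ===== SOURCE B (Python) =====
-- def _emit(lines):
--     # recursive: drop the leading blank/header line, or emit the rest directly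
--     if not lines:
--         return ""
--     head, tail = lines[0], lines[1:]
--     s = head.strip()
--     if s.startswith("# ") or not s:
--         return _emit(tail)
--     return head + "".join("\n" + line for line in tail)
--
-- def _strip_leading_markdown_header(text: str) -> str:
--     return _emit(text.splitlines()).lstrip()
-- ===== Notes on version B (the rewrite author's own statement) =====
-- stated objective: alternative
-- what changed: Replaces A's stateful skip-flag loop that accumulates a list and joins it with a recursive helper that peels off leading blank/header lines and, at the first kept line, builds the output string directly by concatenation (no flag, no list accumulator, no trailing join over a collected list).
import Mathlib
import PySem

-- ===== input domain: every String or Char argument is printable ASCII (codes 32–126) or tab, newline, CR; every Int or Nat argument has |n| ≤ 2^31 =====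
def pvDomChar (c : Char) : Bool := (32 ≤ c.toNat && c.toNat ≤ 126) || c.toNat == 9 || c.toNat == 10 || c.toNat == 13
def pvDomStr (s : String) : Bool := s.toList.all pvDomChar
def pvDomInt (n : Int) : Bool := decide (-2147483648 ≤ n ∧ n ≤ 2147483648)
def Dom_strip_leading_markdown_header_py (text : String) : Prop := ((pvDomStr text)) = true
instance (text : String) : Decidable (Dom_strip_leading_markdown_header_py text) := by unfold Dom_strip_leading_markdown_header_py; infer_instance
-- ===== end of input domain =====

-- B replaces A's skip-flag + accumulator loop by a recursion that drops the first line while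
-- it is blank/header and otherwise emits the remaining lines directly as one string (no list, no flag).

-- ===== PORT A =====
-- A's loop body: state = (skipping, trimmed); branches in A's order.
def pvStepA (st : Bool × List String) (line : String) : Bool × List String :=
  let stripped := PySem.Str.strip line
  if st.1 && PySem.Str.startswith stripped "# " then st
  else if st.1 && (stripped == "") then st
  else (false, st.2 ++ [line])

def strip_leading_markdown_header_py (text : String) : String :=
  let lines := PySem.Str.splitlines text
  let res := lines.foldl pvStepA (true, [])
  PySem.Str.lstrip (PySem.Str.join "\n" res.2)

-- ===== PORT B =====
-- B's recursive helper _emit: drop a leading blank/header line, else emit head ++ "".join("\n"+l for l in tail).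
def pvEmit : List String → String
  | [] => ""
  | head :: tail =>
    let s := PySem.Str.strip head
    if PySem.Str.startswith s "# " || s == "" then pvEmit tail
    else head ++ PySem.Str.join "" (tail.map (fun line => "\n" ++ line))

def strip_leading_markdown_header_py_alt (text : String) : String :=
  PySem.Str.lstrip (pvEmit (PySem.Str.splitlines text))

-- ===== PRECONDITION & SPEC =====
def Spec_strip_leading_markdown_header_py (text : String) (out : String) : Prop := out = strip_leading_markdown_header_py_alt text
instance (text : String) (out : String) : Decidable (Spec_strip_leading_markdown_header_py text out) := by unfold Spec_strip_leading_markdown_header_py; infer_instance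

-- ===== CLAIM (what is proved, stated in full; the proofs are below) =====
def Claim_equal_strip_leading_markdown_header_py : Prop := ∀ (text : String), Dom_strip_leading_markdown_header_py text → Spec_strip_leading_markdown_header_py text (strip_leading_markdown_header_py text)

-- ===== LEMMAS AND PROOFS =====
lemma foldA_false (lines : List String) (acc : List String) :
    lines.foldl pvStepA (false, acc) = (false, acc ++ lines) := by
  induction lines generalizing acc with
  | nil => simp
  | cons h t ih => simp [pvStepA, ih]

lemma join_empty_cons (p : List Char) (ps : List (List Char)) :
    PySem.Chars.join [] (p :: ps) = p ++ PySem.Chars.join [] ps := by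
  cases ps with
  | nil => simp [PySem.Chars.join_singleton, PySem.Chars.join_nil]
  | cons q r => simp [PySem.Chars.join_cons_cons]

-- "\n".join(h :: t) = h ++ "".join(map ("\n" ++ ·) t)
lemma join_cons_eq (h : String) (t : List String) :
    PySem.Str.join "\n" (h :: t) = h ++ PySem.Str.join "" (t.map (fun line => "\n" ++ line)) := by
  apply String.toList_inj.mp
  induction t generalizing h with
  | nil =>
    simp [PySem.Str.toList_join, PySem.Chars.join_singleton, PySem.Chars.join_nil]
  | cons h2 t2 ih =>
    simp only [PySem.Str.toList_join, List.map_cons, PySem.Chars.join_cons_cons,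
      String.toList_append] at ih ⊢
    rw [ih h2]
    simp [join_empty_cons]

lemma emit_eq_fold (lines : List String) :
    pvEmit lines = PySem.Str.join "\n" (lines.foldl pvStepA (true, [])).2 := by
  induction lines with
  | nil => simp [pvEmit, PySem.Str.join]
  | cons h t ih =>
    by_cases hp : (PySem.Str.startswith (PySem.Str.strip h) "# " || PySem.Str.strip h == "") = true
    · have hstep : pvStepA (true, []) h = (true, []) := by
        simp only [Bool.or_eq_true, beq_iff_eq] at hp
        unfold pvStepA
        rcases hp with hp | hp
        · simp only [hp, Bool.true_and, if_true]
        · rw [hp]; simp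
      rw [List.foldl_cons, hstep, ← ih]
      simp only [pvEmit, hp, if_true]
    · have hstep : pvStepA (true, []) h = (false, [h]) := by
        simp only [Bool.or_eq_true, not_or, Bool.not_eq_true, beq_eq_false_iff_ne] at hp
        unfold pvStepA
        simp only [hp.1, Bool.true_and, Bool.false_eq_true, if_false]
        simp [hp.2]
      rw [List.foldl_cons, hstep, foldA_false]
      simp only [pvEmit, hp]
      exact (join_cons_eq h t).symm

-- ===== VERDICT (by name: the statement is the Claim_ definition above) =====
theorem strip_leading_markdown_header_py_spec : Claim_equal_strip_leading_markdown_header_py := by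
  intro text _
  unfold Spec_strip_leading_markdown_header_py strip_leading_markdown_header_py
    strip_leading_markdown_header_py_alt
  simp [emit_eq_fold]
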